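-- pv_equiv track=rewrite | github.com/sidd1801/BT-group-BOOTCAMP | challenges/challenge-039-perfect-square-pattern/solution.py | perfect_square_pattern
-- ===== SOURCE A (Python) =====
-- def perfect_square_pattern(n):
--     num = 1
--     output = []
--
--     for row_num in range(1, n + 1):
--         row = []
--
--         # Determine starting sign based on row number
--         if row_num % 4 in (1, 0):   # rows 1,4,5,8,... start positive
--             sign = 1
--         else:                       # rows 2,3,6,7,... start negative
--             sign = -1
--
--         for j in range(row_num):
--             val = (num * num) * sign
--             row.append(val)
--             sign *= -1   # alternate sign
--             num += 1
--
--         output.append(row)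
--
--     return output
-- ===== SOURCE B (Python) =====
-- def perfect_square_pattern(n):
--     total = n * (n + 1) // 2 if n > 0 else 0
--     flat = [k * k if k % 2 else -(k * k) for k in range(1, total + 1)]
--     output = []
--     offset = 0
--     for length in range(1, n + 1):
--         output.append(flat[offset:offset + length])
--         offset += length
--     return output
-- ===== Notes on version B (the rewrite author's own statement) =====
-- stated objective: simpler
-- what changed: B first builds one flat list of globally-sign-alternating squares (sign = parity of k) and then splits it into triangular row slices, eliminating A's row%4 starting-sign branch and the running sign/num state.
import Mathlib
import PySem

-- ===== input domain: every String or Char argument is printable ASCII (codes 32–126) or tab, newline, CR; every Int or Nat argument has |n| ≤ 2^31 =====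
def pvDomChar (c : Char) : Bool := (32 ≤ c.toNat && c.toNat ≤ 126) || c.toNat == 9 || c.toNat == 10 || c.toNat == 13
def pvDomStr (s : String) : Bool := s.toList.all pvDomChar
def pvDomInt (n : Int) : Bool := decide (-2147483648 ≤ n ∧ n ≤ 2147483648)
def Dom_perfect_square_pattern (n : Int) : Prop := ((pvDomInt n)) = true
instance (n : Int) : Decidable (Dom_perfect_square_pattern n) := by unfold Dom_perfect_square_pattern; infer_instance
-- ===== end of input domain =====

-- B builds one flat list of globally-sign-alternating squares and slices it into
-- triangular rows, instead of A's in-place row construction with a row%4 starting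
-- sign and running sign/num state (objective: simpler decomposition).

-- ===== PORT A =====
def perfect_square_pattern (n : Int) : List (List Int) :=
  ((PySem.List.pyRange 1 (n + 1) 1).foldl
    (fun (st : Int × List (List Int)) row_num =>
      -- st.1 = num, st.2 = output; inner state: (row, sign, num)
      (((PySem.List.pyRange 0 row_num 1).foldl
          (fun (s : List Int × Int × Int) _j =>
            (s.1 ++ [s.2.2 * s.2.2 * s.2.1], -s.2.1, s.2.2 + 1))
          ([], if PySem.Int.mod row_num 4 = 1 ∨ PySem.Int.mod row_num 4 = 0 then 1 else -1,
           st.1)).2.2,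
       st.2 ++ [((PySem.List.pyRange 0 row_num 1).foldl
          (fun (s : List Int × Int × Int) _j =>
            (s.1 ++ [s.2.2 * s.2.2 * s.2.1], -s.2.1, s.2.2 + 1))
          ([], if PySem.Int.mod row_num 4 = 1 ∨ PySem.Int.mod row_num 4 = 0 then 1 else -1,
           st.1)).1]))
    (1, [])).2

-- ===== PORT B =====
def perfect_square_pattern_alt (n : Int) : List (List Int) :=
  -- flat list of signed squares for k = 1 .. n*(n+1)//2, sign = parity of k
  ((PySem.List.pyRange 1 ((if 0 < n then PySem.Int.floordiv (n * (n + 1)) 2 else 0) + 1) 1).map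
      (fun k => if PySem.Int.mod k 2 ≠ 0 then k * k else -(k * k))
    |> fun flat =>
  -- partition it into rows of lengths 1, 2, …, n; st = (output, offset)
  ((PySem.List.pyRange 1 (n + 1) 1).foldl
    (fun (st : List (List Int) × Int) length =>
      (st.1 ++ [PySem.List.slice flat (some st.2) (some (st.2 + length))], st.2 + length))
    ([], 0)).1)

-- ===== PRECONDITION & SPEC =====
def Spec_perfect_square_pattern (n : Int) (out : List (List Int)) : Prop := out = perfect_square_pattern_alt n
instance (n : Int) (out : List (List Int)) : Decidable (Spec_perfect_square_pattern n out) := by unfold Spec_perfect_square_pattern; infer_instance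

-- ===== CLAIM (what is proved, stated in full; the proofs are below) =====
def Claim_equal_perfect_square_pattern : Prop := ∀ (n : Int), Dom_perfect_square_pattern n → Spec_perfect_square_pattern n (perfect_square_pattern n)

-- ===== LEMMAS AND PROOFS =====

-- signed square: k^2 if k is odd, -k^2 if k is even
def pvSg (k : Int) : Int := if k % 2 = 1 then k * k else -(k * k)

-- starting sign of the number k
def pvSgn (k : Int) : Int := if k % 2 = 1 then 1 else -1

def pvTri : Nat → Nat
  | 0 => 0
  | m + 1 => pvTri m + (m + 1)

-- common target value: the list of the first m rows
def pvRows : Nat → List (List Int)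
  | 0 => []
  | m + 1 => pvRows m ++
      [(List.range (m + 1)).map (fun j : Nat => pvSg ((pvTri m : Int) + 1 + (j : Int)))]

lemma pvSgn_succ (k : Int) : -(pvSgn k) = pvSgn (k + 1) := by
  unfold pvSgn; split_ifs with h1 h2 h2 <;> omega

lemma pvSg_eq (k : Int) : k * k * pvSgn k = pvSg k := by
  unfold pvSg pvSgn; split_ifs <;> ring

lemma pvTri_two_mul (m : Nat) : 2 * pvTri m = m * (m + 1) := by
  induction m with
  | zero => rfl
  | succ m ih => unfold pvTri; nlinarith

lemma pvTri_mono {m n : Nat} (h : m ≤ n) : pvTri m ≤ pvTri n := by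
  induction n with
  | zero =>
    have h0 : m = 0 := by omega
    simp [h0]
  | succ n ih =>
    have hs : pvTri (n + 1) = pvTri n + (n + 1) := rfl
    rcases Nat.lt_or_ge m (n + 1) with h1 | h1
    · have := ih (by omega); omega
    · have h2 : m = n + 1 := by omega
      simp [h2]

-- parity of pvTri m in terms of m % 4
lemma pvTri_mod_two (m : Nat) : pvTri m % 2 = (if m % 4 = 0 ∨ m % 4 = 3 then 0 else 1) := by
  induction m with
  | zero => rfl
  | succ m ih =>
    have h : pvTri (m + 1) = pvTri m + (m + 1) := rfl
    rw [h]
    split_ifs at ih ⊢ <;> omega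

-- A's inner loop, as a fold over a list whose elements are ignored
lemma inner_spec (l : List Int) : ∀ (row : List Int) (num : Int),
    l.foldl (fun (s : List Int × Int × Int) _j =>
        (s.1 ++ [s.2.2 * s.2.2 * s.2.1], -s.2.1, s.2.2 + 1)) (row, pvSgn num, num)
      = (row ++ (List.range l.length).map (fun j : Nat => pvSg (num + (j : Int))),
         pvSgn (num + (l.length : Int)), num + (l.length : Int)) := by
  induction l with
  | nil => intro row num; simp
  | cons a t ih =>
    intro row num
    simp only [List.foldl_cons]
    rw [pvSg_eq, pvSgn_succ]
    rw [ih (row ++ [pvSg num]) (num + 1)]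
    rw [List.length_cons, List.range_succ_eq_map, List.map_cons, List.map_map]
    refine Prod.ext ?_ (Prod.ext ?_ ?_)
    · show row ++ [pvSg num] ++ _ = row ++ (pvSg (num + (0 : Nat)) :: _)
      rw [List.append_assoc]
      congr 1
      show [pvSg num] ++ _ = pvSg (num + (0 : Nat)) :: _
      rw [List.singleton_append]
      congr 1
      · norm_num
      · apply List.map_congr_left
        intro j _
        simp only [Function.comp]
        congr 1
        push_cast
        ring
    · show pvSgn (num + 1 + (t.length : Int)) = pvSgn (num + ((t.length + 1 : Nat) : Int))
      congr 1; push_cast; ring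
    · show num + 1 + (t.length : Int) = num + ((t.length + 1 : Nat) : Int)
      push_cast; ring

-- A's outer loop invariant, over the first m rows
lemma a_fold (m : Nat) :
    ((List.range m).map (fun k : Nat => (1 : Int) + (k : Int))).foldl
      (fun (st : Int × List (List Int)) row_num =>
        (((PySem.List.pyRange 0 row_num 1).foldl
            (fun (s : List Int × Int × Int) _j =>
              (s.1 ++ [s.2.2 * s.2.2 * s.2.1], -s.2.1, s.2.2 + 1))
            ([], if PySem.Int.mod row_num 4 = 1 ∨ PySem.Int.mod row_num 4 = 0 then 1 else -1,
             st.1)).2.2,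
         st.2 ++ [((PySem.List.pyRange 0 row_num 1).foldl
            (fun (s : List Int × Int × Int) _j =>
              (s.1 ++ [s.2.2 * s.2.2 * s.2.1], -s.2.1, s.2.2 + 1))
            ([], if PySem.Int.mod row_num 4 = 1 ∨ PySem.Int.mod row_num 4 = 0 then 1 else -1,
             st.1)).1]))
      (1, []) = ((pvTri m : Int) + 1, pvRows m) := by
  induction m with
  | zero => simp [pvTri, pvRows]
  | succ m ih =>
    rw [List.range_succ, List.map_append, List.foldl_append, ih]
    simp only [List.map_cons, List.map_nil, List.foldl_cons, List.foldl_nil]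
    have hsign : (if PySem.Int.mod ((1 : Int) + (m : Int)) 4 = 1 ∨
          PySem.Int.mod ((1 : Int) + (m : Int)) 4 = 0 then (1 : Int) else -1)
        = pvSgn ((pvTri m : Int) + 1) := by
      have h2 := pvTri_mod_two m
      rw [PySem.Int.mod_eq_emod_of_pos (a := (1 : Int) + (m : Int)) (by omega)]
      unfold pvSgn
      split_ifs at h2 ⊢ <;> omega
    have hrange : PySem.List.pyRange 0 ((1 : Int) + (m : Int)) 1
        = (List.range (m + 1)).map (fun k : Nat => (0 : Int) + (k : Int)) := by
      rw [PySem.List.pyRange_one]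
      have hk : ((1 : Int) + (m : Int) - 0).toNat = m + 1 := by omega
      rw [hk]
    rw [hsign, hrange]
    rw [inner_spec ((List.range (m + 1)).map (fun k : Nat => (0 : Int) + (k : Int))) []
        ((pvTri m : Int) + 1)]
    simp only [List.length_map, List.length_range, List.nil_append]
    refine Prod.ext ?_ ?_
    · show (pvTri m : Int) + 1 + ((m + 1 : Nat) : Int) = (pvTri (m + 1) : Int) + 1
      have h : pvTri (m + 1) = pvTri m + (m + 1) := rfl
      rw [h]; push_cast; ring
    · show pvRows m ++ [_] = pvRows (m + 1)
      rfl

-- the flat list of B equals the signed squares 1..t, for natural t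
lemma flat_eq (t : Nat) :
    (PySem.List.pyRange 1 ((t : Int) + 1) 1).map
      (fun k => if PySem.Int.mod k 2 ≠ 0 then k * k else -(k * k))
    = (List.range t).map (fun i : Nat => pvSg ((i : Int) + 1)) := by
  rw [PySem.List.pyRange_one]
  have h : ((t : Int) + 1 - 1).toNat = t := by omega
  rw [h, List.map_map]
  apply List.map_congr_left
  intro i _
  simp only [Function.comp]
  rw [PySem.Int.mod_eq_emod_of_pos (a := (1 : Int) + (i : Int)) (by omega)]
  unfold pvSg
  have hc : ((1 : Int) + (i : Int)) = ((i : Int) + 1) := by ring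
  rw [hc]
  have h01 : ((i : Int) + 1) % 2 = 0 ∨ ((i : Int) + 1) % 2 = 1 := by omega
  rcases h01 with h0 | h0 <;> simp [h0]

-- slicing the flat list of signed squares gives row m (0-indexed)
lemma slice_row (t m : Nat) (h : pvTri m + (m + 1) ≤ t) :
    PySem.List.slice ((List.range t).map (fun i : Nat => pvSg ((i : Int) + 1)))
      (some (pvTri m : Int)) (some ((pvTri m : Int) + ((1 : Int) + (m : Int))))
    = (List.range (m + 1)).map (fun j : Nat => pvSg ((pvTri m : Int) + 1 + (j : Int))) := by
  have hc : (pvTri m : Int) + ((1 : Int) + (m : Int)) = (pvTri m : Int) + ((m + 1 : Nat) : Int) := by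
    push_cast; ring
  rw [hc, PySem.List.slice_natCast_add]
  apply List.ext_getElem
  · simp; omega
  · intro i h1 h2
    simp only [List.getElem_take, List.getElem_drop, List.getElem_map, List.getElem_range]
    congr 1
    push_cast
    ring

-- B's outer loop invariant
lemma b_fold (n : Nat) (m : Nat) (hm : m ≤ n) :
    ((List.range m).map (fun k : Nat => (1 : Int) + (k : Int))).foldl
      (fun (st : List (List Int) × Int) length =>
        (st.1 ++ [PySem.List.slice
            ((List.range (pvTri n)).map (fun i : Nat => pvSg ((i : Int) + 1)))
            (some st.2) (some (st.2 + length))], st.2 + length))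
      ([], 0) = (pvRows m, (pvTri m : Int)) := by
  induction m with
  | zero => simp [pvRows, pvTri]
  | succ m ih =>
    rw [List.range_succ, List.map_append, List.foldl_append, ih (by omega)]
    simp only [List.map_cons, List.map_nil, List.foldl_cons, List.foldl_nil]
    have hbound : pvTri m + (m + 1) ≤ pvTri n := by
      have h1 : pvTri (m + 1) ≤ pvTri n := pvTri_mono hm
      have h2 : pvTri (m + 1) = pvTri m + (m + 1) := rfl
      omega
    rw [slice_row (pvTri n) m hbound]
    refine Prod.ext ?_ ?_
    · show pvRows m ++ [_] = pvRows (m + 1)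
      rfl
    · show (pvTri m : Int) + ((1 : Int) + (m : Int)) = (pvTri (m + 1) : Int)
      have h : pvTri (m + 1) = pvTri m + (m + 1) := rfl
      rw [h]; push_cast; ring

lemma total_eq (n : Int) (hn : 0 ≤ n) :
    PySem.Int.floordiv (n * (n + 1)) 2 = (pvTri n.toNat : Int) := by
  have h2 : 2 * pvTri n.toNat = n.toNat * (n.toNat + 1) := pvTri_two_mul n.toNat
  have hn' : (n.toNat : Int) = n := by omega
  have hmul : n * (n + 1) = 2 * (pvTri n.toNat : Int) := by
    have h3 := congrArg (fun x : Nat => (x : Int)) h2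
    push_cast at h3
    rw [hn'] at h3
    linarith
  rw [hmul, PySem.Int.floordiv_eq_ediv_of_pos (by omega)]
  exact Int.mul_ediv_cancel_left _ (by norm_num)

lemma range_arg (n : Int) : PySem.List.pyRange 1 (n + 1) 1
    = (List.range n.toNat).map (fun k : Nat => (1 : Int) + (k : Int)) := by
  rw [PySem.List.pyRange_one]
  have hk : (n + 1 - 1).toNat = n.toNat := by omega
  rw [hk]

-- ===== VERDICT (by name: the statement is the Claim_ definition above) =====
theorem perfect_square_pattern_spec : Claim_equal_perfect_square_pattern := by
  intro n _
  show perfect_square_pattern n = perfect_square_pattern_alt n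
  unfold perfect_square_pattern perfect_square_pattern_alt
  rcases Int.lt_or_le 0 n with hpos | hneg
  case inr =>
    have h : PySem.List.pyRange 1 (n + 1) 1 = [] :=
      PySem.List.pyRange_one_eq_nil (by omega)
    simp [h]
  · rw [if_pos hpos, range_arg n, total_eq n (le_of_lt hpos), flat_eq (pvTri n.toNat),
      a_fold n.toNat]
    beta_reduce
    rw [b_fold n.toNat n.toNat (le_refl _)]
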